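-- pv_equiv track=rewrite | github.com/rimirome/rimidi-kg | tools/auto_schema_diff.py | extract_attribute_names
-- ===== SOURCE A (Python) =====
-- from typing import Dict, List
--
-- def extract_attribute_names(text: str) -> Dict[str, str]:
--     sections: dict[str, str] = {}
--     current_section: str | None = None
--     current_lines: list[str] = []
--     for line in text.splitlines():
--         if line.startswith("  ") and not line.startswith("    ") and line.strip().endswith(":"):
--             if current_section is not None:
--                 sections[current_section] = "\n".join(current_lines).strip()
--                 current_lines = []
--             current_section = line.strip().rstrip(":")
--         elif current_section is not None:
--             current_lines.append(line)
--     if current_section is not None: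
--         sections[current_section] = "\n".join(current_lines).strip()
--     return sections
-- ===== SOURCE B (Python) =====
-- def extract_attribute_names(text: str):
--     lines = text.splitlines()
--
--     def is_header(line):
--         return line.startswith("  ") and not line.startswith("    ") and line.strip().endswith(":")
--
--     idxs = [i for i, line in enumerate(lines) if is_header(line)]
--     bounds = list(zip(idxs, idxs[1:] + [len(lines)]))
--     return {
--         lines[i].strip().rstrip(":"): "\n".join(lines[i + 1:j]).strip()
--         for i, j in bounds
--     }
-- ===== Notes on version B (the rewrite author's own statement) =====
-- stated objective: alternative
-- what changed: Replaces A's one-pass state machine threading current_section/current_lines accumulators by a two-phase scheme: collect the header line indices first, then build each section by slicing the lines between consecutive header indices.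
import Mathlib
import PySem

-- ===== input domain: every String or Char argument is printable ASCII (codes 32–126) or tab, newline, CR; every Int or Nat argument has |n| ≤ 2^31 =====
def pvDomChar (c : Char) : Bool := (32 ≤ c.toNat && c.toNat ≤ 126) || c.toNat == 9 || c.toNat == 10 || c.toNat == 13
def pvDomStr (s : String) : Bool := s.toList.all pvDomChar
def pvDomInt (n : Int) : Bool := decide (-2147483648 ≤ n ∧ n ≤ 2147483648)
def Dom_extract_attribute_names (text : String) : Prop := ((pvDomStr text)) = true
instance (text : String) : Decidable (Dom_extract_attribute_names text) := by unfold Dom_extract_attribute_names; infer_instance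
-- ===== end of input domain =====

-- B replaces A's state-machine fold (current_section/current_lines threaded through one pass) by
-- collecting the header-line indices first and then slicing the lines between consecutive headers
-- (objective: alternative decomposition, same asymptotic cost).

-- exact port of Python's str.rstrip(":"): drop every trailing ':' (both sources use line.strip().rstrip(":"))
def pvRstripColon (s : String) : String :=
  String.ofList ((s.toList.reverse.dropWhile (· == ':')).reverse)

-- ===== PORT A =====
-- the body of A's for-loop, on the state (sections, current_section, current_lines)
def pvStepA (st : PySem.Dict String String × Option String × List String) (line : String) :
    PySem.Dict String String × Option String × List String :=
  if PySem.Str.startswith line "  " && !PySem.Str.startswith line "    " &&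
      PySem.Str.endswith (PySem.Str.strip line) ":" then
    match st.2.1 with
    | some s =>
        (st.1.insert s (PySem.Str.strip (PySem.Str.join "\n" st.2.2)),
         some (pvRstripColon (PySem.Str.strip line)), ([] : List String))
    | none => (st.1, some (pvRstripColon (PySem.Str.strip line)), st.2.2)
  else
    match st.2.1 with
    | some _ => (st.1, st.2.1, st.2.2 ++ [line])
    | none => (st.1, st.2.1, st.2.2)

-- A's final flush after the loop
def pvFinishA (st : PySem.Dict String String × Option String × List String) :
    PySem.Dict String String :=
  match st.2.1 with
  | some s => st.1.insert s (PySem.Str.strip (PySem.Str.join "\n" st.2.2))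
  | none => st.1

def extract_attribute_names (text : String) : List (String × String) :=
  (pvFinishA ((PySem.Str.splitlines text).foldl pvStepA (PySem.Dict.empty, none, []))).items

-- ===== PORT B =====
def pvIsHeader (line : String) : Bool :=
  PySem.Str.startswith line "  " && !PySem.Str.startswith line "    " &&
    PySem.Str.endswith (PySem.Str.strip line) ":"

def extract_attribute_names_alt (text : String) : List (String × String) :=
  let lines := PySem.Str.splitlines text
  let idxs := ((PySem.List.enumerate lines).filter (fun p => pvIsHeader p.2)).map (·.1)
  let bounds := idxs.zip (idxs.drop 1 ++ [(lines.length : Int)])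
  (bounds.foldl (fun d p =>
      d.insert (pvRstripColon (PySem.Str.strip (PySem.List.pyGetD lines p.1 "")))
        (PySem.Str.strip (PySem.Str.join "\n"
          (PySem.List.slice lines (some (p.1 + 1)) (some p.2)))))
    PySem.Dict.empty).items

-- ===== PRECONDITION & SPEC =====
def Spec_extract_attribute_names (text : String) (out : List (String × String)) : Prop := out = extract_attribute_names_alt text
instance (text : String) (out : List (String × String)) : Decidable (Spec_extract_attribute_names text out) := by unfold Spec_extract_attribute_names; infer_instance

-- ===== CLAIM (what is proved, stated in full; the proofs are below) =====
def Claim_equal_extract_attribute_names : Prop := ∀ (text : String), Dom_extract_attribute_names text → Spec_extract_attribute_names text (extract_attribute_names text)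

-- ===== LEMMAS AND PROOFS =====

-- a non-header line
def pvNH (l : String) : Bool := !pvIsHeader l

-- the (section name, stripped body) groups of a line list: at a header, span its body, recurse after it
def pvGroups : List String → List (String × String)
  | [] => []
  | l :: ls =>
    if pvIsHeader l then
      (pvRstripColon (PySem.Str.strip l),
        PySem.Str.strip (PySem.Str.join "\n" (ls.takeWhile pvNH))) :: pvGroups (ls.dropWhile pvNH)
    else pvGroups ls
termination_by ll => ll.length
decreasing_by
  · exact Nat.lt_succ_of_le (ls.length_dropWhile_le pvNH)
  · exact Nat.lt_succ_of_le (Nat.le_refl _)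

def pvDictOf (d : PySem.Dict String String) (gs : List (String × String)) :
    PySem.Dict String String :=
  gs.foldl (fun d g => d.insert g.1 g.2) d

-- the header indices of a line list, as naturals
def pvHIdxs : List String → List Nat
  | [] => []
  | l :: ls => (if pvIsHeader l then [0] else []) ++ (pvHIdxs ls).map (· + 1)

-- B's pair list as a function of the lines and a Nat index list
def pvPairF (lines : List String) (p : Nat × Nat) : String × String :=
  (pvRstripColon (PySem.Str.strip (lines.getD p.1 "")),
   PySem.Str.strip (PySem.Str.join "\n" ((lines.drop (p.1 + 1)).take (p.2 - (p.1 + 1)))))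

def pvPairsN (lines : List String) (idxs : List Nat) : List (String × String) :=
  (idxs.zip (idxs.drop 1 ++ [lines.length])).map (pvPairF lines)

lemma pvStepA_header (st : PySem.Dict String String × Option String × List String)
    (line : String) (h : pvIsHeader line = true) :
    pvStepA st line =
      match st.2.1 with
      | some s =>
          (st.1.insert s (PySem.Str.strip (PySem.Str.join "\n" st.2.2)),
           some (pvRstripColon (PySem.Str.strip line)), ([] : List String))
      | none => (st.1, some (pvRstripColon (PySem.Str.strip line)), st.2.2) := by
  unfold pvStepA
  rw [show (PySem.Str.startswith line "  " && !PySem.Str.startswith line "    " &&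
      PySem.Str.endswith (PySem.Str.strip line) ":") = pvIsHeader line from rfl, h]
  simp

lemma pvStepA_nonheader (st : PySem.Dict String String × Option String × List String)
    (line : String) (h : pvIsHeader line = false) :
    pvStepA st line =
      match st.2.1 with
      | some _ => (st.1, st.2.1, st.2.2 ++ [line])
      | none => (st.1, st.2.1, st.2.2) := by
  unfold pvStepA
  rw [show (PySem.Str.startswith line "  " && !PySem.Str.startswith line "    " &&
      PySem.Str.endswith (PySem.Str.strip line) ":") = pvIsHeader line from rfl, h]
  simp

lemma pvGroups_cons_header (l : String) (ls : List String) (h : pvIsHeader l = true) :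
    pvGroups (l :: ls) =
      (pvRstripColon (PySem.Str.strip l),
        PySem.Str.strip (PySem.Str.join "\n" (ls.takeWhile pvNH))) :: pvGroups (ls.dropWhile pvNH) := by
  rw [pvGroups, if_pos h]

lemma pvGroups_cons_nonheader (l : String) (ls : List String) (h : pvIsHeader l = false) :
    pvGroups (l :: ls) = pvGroups ls := by
  rw [pvGroups, if_neg (by simp [h])]

lemma pvGroups_dropWhile (ls : List String) : pvGroups (ls.dropWhile pvNH) = pvGroups ls := by
  induction ls with
  | nil => rfl
  | cons l ls ih =>
    by_cases h : pvIsHeader l = true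
    · rw [List.dropWhile_cons_of_neg (by simp [pvNH, h])]
    · simp only [Bool.not_eq_true] at h
      rw [List.dropWhile_cons_of_pos (by simp [pvNH, h]), ih, pvGroups_cons_nonheader l ls h]

-- A's fold with a live current section
lemma pvFoldA_some (ls : List String) :
    ∀ (d : PySem.Dict String String) (s : String) (acc : List String),
    pvFinishA (ls.foldl pvStepA (d, some s, acc)) =
      pvDictOf (d.insert s (PySem.Str.strip (PySem.Str.join "\n" (acc ++ ls.takeWhile pvNH))))
        (pvGroups (ls.dropWhile pvNH)) := by
  induction ls with
  | nil => intro d s acc; simp [pvFinishA, pvDictOf, pvGroups]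
  | cons l ls ih =>
    intro d s acc
    by_cases h : pvIsHeader l = true
    · rw [List.foldl_cons, pvStepA_header _ _ h]
      simp only
      rw [ih, List.takeWhile_cons_of_neg (by simp [pvNH, h]),
        List.dropWhile_cons_of_neg (by simp [pvNH, h]), pvGroups_cons_header l ls h]
      simp [pvDictOf]
    · simp only [Bool.not_eq_true] at h
      rw [List.foldl_cons, pvStepA_nonheader _ _ h]
      simp only
      rw [ih, List.takeWhile_cons_of_pos (by simp [pvNH, h]),
        List.dropWhile_cons_of_pos (by simp [pvNH, h])]
      simp

-- A's fold before the first header (current_lines is [] there)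
lemma pvFoldA_none (ls : List String) :
    ∀ (d : PySem.Dict String String),
    pvFinishA (ls.foldl pvStepA (d, none, [])) = pvDictOf d (pvGroups ls) := by
  induction ls with
  | nil => intro d; simp [pvFinishA, pvDictOf, pvGroups]
  | cons l ls ih =>
    intro d
    by_cases h : pvIsHeader l = true
    · rw [List.foldl_cons, pvStepA_header _ _ h]
      simp only
      rw [pvFoldA_some ls, pvGroups_cons_header l ls h]
      simp [pvDictOf]
    · simp only [Bool.not_eq_true] at h
      rw [List.foldl_cons, pvStepA_nonheader _ _ h]
      simp only
      rw [ih, pvGroups_cons_nonheader l ls h]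

-- the header-index list computed by B's first pass
lemma pvIdxs_eq_gen (lines : List String) :
    ∀ (s : Int),
    ((PySem.List.enumerate lines s).filter (fun p => pvIsHeader p.2)).map (·.1)
      = (pvHIdxs lines).map (fun n : Nat => (n : Int) + s) := by
  induction lines with
  | nil => intro s; simp [PySem.List.enumerate, pvHIdxs]
  | cons l ls ih =>
    intro s
    rw [PySem.List.enumerate_cons, List.filter_cons, pvHIdxs]
    by_cases h : pvIsHeader l = true
    · rw [if_pos (by simpa using h), if_pos h, List.map_cons, ih (s + 1)]
      rw [List.singleton_append, List.map_cons, List.map_map]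
      refine congrArg₂ _ (by norm_num) (List.map_congr_left fun n _ => ?_)
      simp [Function.comp]; ring
    · simp only [Bool.not_eq_true] at h
      rw [if_neg (by simp [h]), if_neg (by simp [h]), ih (s + 1), List.nil_append, List.map_map]
      refine List.map_congr_left fun n _ => ?_
      simp [Function.comp]; ring

-- no header in ls: pvHIdxs is empty and takeWhile keeps everything
lemma pvHIdxs_nil_takeWhile (ls : List String) (h : pvHIdxs ls = []) :
    ls.takeWhile pvNH = ls := by
  induction ls with
  | nil => rfl
  | cons l ls ih =>
    rw [pvHIdxs] at h
    by_cases hl : pvIsHeader l = true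
    · simp [hl] at h
    · simp only [Bool.not_eq_true] at hl
      simp only [hl, if_neg Bool.false_ne_true, List.nil_append, List.map_eq_nil_iff] at h
      rw [List.takeWhile_cons_of_pos (by simp [pvNH, hl]), ih h]

-- the first header index i of ls cuts off exactly the non-header prefix
lemma pvHIdxs_head_takeWhile (ls : List String) :
    ∀ (i : Nat) (rest : List Nat), pvHIdxs ls = i :: rest → ls.takeWhile pvNH = ls.take i := by
  induction ls with
  | nil => intro i rest h; simp [pvHIdxs] at h
  | cons l ls ih =>
    intro i rest h
    rw [pvHIdxs] at h
    by_cases hl : pvIsHeader l = true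
    · simp only [hl, if_pos, List.singleton_append, List.cons.injEq] at h
      rw [List.takeWhile_cons_of_neg (by simp [pvNH, hl]), ← h.1]
      rfl
    · simp only [Bool.not_eq_true] at hl
      simp only [hl, if_neg Bool.false_ne_true, List.nil_append, List.map_eq_cons_iff] at h
      obtain ⟨i₀, I₀, hI, hi, -⟩ := h
      rw [List.takeWhile_cons_of_pos (by simp [pvNH, hl]), ih i₀ I₀ hI, ← hi, List.take_succ_cons]

-- prepending one line and shifting every index by one leaves the pairs unchanged
lemma pvPairsN_shift (l : String) (ls : List String) (idxs : List Nat) :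
    pvPairsN (l :: ls) (idxs.map (· + 1)) = pvPairsN ls idxs := by
  unfold pvPairsN
  rw [← List.map_drop, show ([(l :: ls).length] : List Nat) = [ls.length].map (· + 1) by simp,
    ← List.map_append, List.zip_map, List.map_map]
  refine List.map_congr_left fun p _ => ?_
  obtain ⟨i, j⟩ := p
  simp only [Function.comp_apply, Prod.map_apply, pvPairF, List.getD_cons_succ,
    List.drop_succ_cons]
  have : j + 1 - (i + 1 + 1) = j - (i + 1) := by omega
  rw [this]

-- the heart of the B side: the pair list built from the header indices is exactly the groups
lemma pvPairsN_hIdxs (lines : List String) : pvPairsN lines (pvHIdxs lines) = pvGroups lines := by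
  induction lines with
  | nil => rw [pvGroups]; rfl
  | cons l ls ih =>
    by_cases h : pvIsHeader l = true
    · rcases hI : pvHIdxs ls with _ | ⟨i, I₂⟩
      · rw [pvHIdxs, if_pos h, List.singleton_append, hI, pvGroups_cons_header l ls h,
          pvGroups_dropWhile, pvHIdxs_nil_takeWhile ls hI]
        have h0 : pvGroups ls = [] := by rw [← ih, hI]; rfl
        rw [h0]
        simp [pvPairsN, pvPairF]
      · have tail : pvPairsN (l :: ls) ((i :: I₂).map (· + 1)) = pvGroups (ls.dropWhile pvNH) := by
          rw [hI] at ih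
          exact (pvPairsN_shift l ls (i :: I₂)).trans (ih.trans (pvGroups_dropWhile ls).symm)
        rw [pvHIdxs, if_pos h, List.singleton_append, hI, pvGroups_cons_header l ls h,
          pvHIdxs_head_takeWhile ls i I₂ hI]
        rw [pvPairsN, List.map_cons]
        rw [show List.drop 1 (0 :: (i + 1) :: I₂.map (· + 1)) = (i + 1) :: I₂.map (· + 1) from
          rfl, List.cons_append, List.zip_cons_cons, List.map_cons]
        rw [pvPairsN, List.map_cons,
          show List.drop 1 ((i + 1) :: I₂.map (· + 1)) = I₂.map (· + 1) from rfl] at tail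
        refine congrArg₂ _ ?_ tail
        simp [pvPairF]
    · simp only [Bool.not_eq_true] at h
      rw [pvHIdxs, if_neg (by simp [h]), List.nil_append, pvPairsN_shift, ih,
        pvGroups_cons_nonheader l ls h]

-- B's fold, rewritten over the Nat header indices
lemma pvAltDict (lines : List String) :
    ((((PySem.List.enumerate lines).filter (fun p => pvIsHeader p.2)).map (·.1)).zip
        ((((PySem.List.enumerate lines).filter (fun p => pvIsHeader p.2)).map (·.1)).drop 1 ++
          [(lines.length : Int)])).foldl
      (fun d p =>
        d.insert (pvRstripColon (PySem.Str.strip (PySem.List.pyGetD lines p.1 "")))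
          (PySem.Str.strip (PySem.Str.join "\n"
            (PySem.List.slice lines (some (p.1 + 1)) (some p.2)))))
      PySem.Dict.empty
      = pvDictOf PySem.Dict.empty (pvPairsN lines (pvHIdxs lines)) := by
  rw [pvIdxs_eq_gen lines 0,
    show (pvHIdxs lines).map (fun n : Nat => (n : Int) + 0) =
      (pvHIdxs lines).map (fun n : Nat => (n : Int)) from
      List.map_congr_left fun n _ => by ring]
  rw [← List.map_drop,
    show ([(lines.length : Int)]) = ([lines.length] : List Nat).map (fun n : Nat => (n : Int)) by
      simp,
    ← List.map_append, List.zip_map, List.foldl_map]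
  unfold pvDictOf pvPairsN
  rw [List.foldl_map]
  refine congrFun (congrFun (congrArg List.foldl ?_) PySem.Dict.empty) _
  funext d p
  obtain ⟨i, j⟩ := p
  simp only [Prod.map_apply, pvPairF]
  rw [PySem.List.pyGetD_natCast,
    show ((i : Int) + 1) = ((i + 1 : Nat) : Int) by push_cast; ring, PySem.List.slice_natCast]

theorem extract_attribute_names_spec : Claim_equal_extract_attribute_names := by
  intro text _
  show extract_attribute_names text = extract_attribute_names_alt text
  unfold extract_attribute_names extract_attribute_names_alt
  simp only
  rw [pvFoldA_none, pvAltDict, pvPairsN_hIdxs]
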